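-- pv_equiv track=rewrite | github.com/StBinge/leetcode | 1955.count-number-of-special-subsequences.py | countSpecialSubsequences
-- ===== SOURCE A (Python) =====
-- from typing import List
--
-- def countSpecialSubsequences(nums: List[int]) -> int:
--     Mods=10**9+7
--     f1=f2=0
--     cnt0=0
--     for n in nums:
--         if n==0:
--             cnt0+=1
--             continue
--         elif not cnt0:
--             continue
--
--         if n==1:
--             f0=(1<<cnt0)-1
--             f1=(f0+(f1<<1))%Mods
--
--         else:
--             f2=(f1+(f2<<1))%Mods
--
--     return f2
-- ===== SOURCE B (Python) =====
-- def countSpecialSubsequences(nums):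
--     # Alternative: right-to-left DP: c2 = #subsequences of the suffix matching 2+,
--     # c1 = #matching 1+2+, c0 = #matching 0+1+2+ (all mod 1e9+7).
--     M = 10 ** 9 + 7
--     c2 = c1 = c0 = 0
--     for n in reversed(nums):
--         if n == 0:
--             c0 = (2 * c0 + c1) % M
--         elif n == 1:
--             c1 = (2 * c1 + c2) % M
--         else:
--             c2 = (2 * c2 + 1) % M
--     return c0
-- ===== Notes on version B (the rewrite author's own statement) =====
-- stated objective: alternative
-- what changed: Replaces the forward DP over (cnt0, f1, f2) that rebuilds the big-integer power (1<<cnt0) at every 1 with a right-to-left DP counting 2+, 1+2+ and 0+1+2+ suffix subsequences, all kept reduced mod 1e9+7.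
import Mathlib
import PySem

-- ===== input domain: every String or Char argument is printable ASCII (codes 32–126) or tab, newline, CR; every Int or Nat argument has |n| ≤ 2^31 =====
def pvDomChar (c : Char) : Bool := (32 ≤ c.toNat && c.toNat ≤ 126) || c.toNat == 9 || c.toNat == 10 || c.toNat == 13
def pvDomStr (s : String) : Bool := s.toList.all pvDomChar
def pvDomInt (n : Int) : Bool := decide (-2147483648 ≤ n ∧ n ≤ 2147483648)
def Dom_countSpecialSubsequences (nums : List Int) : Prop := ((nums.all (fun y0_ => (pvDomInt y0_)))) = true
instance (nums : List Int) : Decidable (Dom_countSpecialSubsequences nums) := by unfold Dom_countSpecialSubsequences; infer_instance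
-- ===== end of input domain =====

-- B replaces A's forward DP (which rebuilds the unreduced power (1<<cnt0) at every 1)
-- with a right-to-left DP over suffixes, all values kept reduced mod 1e9+7 (objective: alternative algorithm).


def pvM : Int := 1000000007

-- ===== PORT A =====
-- state: (f1, f2, cnt0); branch order as in the Python (n==0 / not cnt0 / n==1 / else)
def stepA (st : Int × Int × Nat) (n : Int) : Int × Int × Nat :=
  let (f1, f2, cnt0) := st
  if n = 0 then (f1, f2, cnt0 + 1)
  else if cnt0 = 0 then (f1, f2, cnt0)
  else if n = 1 then
    let f0 : Int := (2 ^ cnt0) - 1          -- (1 << cnt0) - 1, unreduced as in A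
    (PySem.Int.mod (f0 + 2 * f1) pvM, f2, cnt0)
  else (f1, PySem.Int.mod (f1 + 2 * f2) pvM, cnt0)

def countSpecialSubsequences (nums : List Int) : Int :=
  (nums.foldl stepA (0, 0, 0)).2.1

-- ===== PORT B =====
-- state: (c2, c1, c0); 'for n in reversed(nums)' = foldr processing the last element first
def stepB (n : Int) (st : Int × Int × Int) : Int × Int × Int :=
  let (c2, c1, c0) := st
  if n = 0 then (c2, c1, PySem.Int.mod (2 * c0 + c1) pvM)
  else if n = 1 then (c2, PySem.Int.mod (2 * c1 + c2) pvM, c0)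
  else (PySem.Int.mod (2 * c2 + 1) pvM, c1, c0)

def countSpecialSubsequences_alt (nums : List Int) : Int :=
  (nums.foldr stepB (0, 0, 0)).2.2

-- ===== PRECONDITION & SPEC =====
def Spec_countSpecialSubsequences (nums : List Int) (out : Int) : Prop := out = countSpecialSubsequences_alt nums
instance (nums : List Int) (out : Int) : Decidable (Spec_countSpecialSubsequences nums out) := by unfold Spec_countSpecialSubsequences; infer_instance

-- ===== CLAIM (what is proved, stated in full; the proofs are below) =====
def Claim_equal_countSpecialSubsequences : Prop := ∀ (nums : List Int), Dom_countSpecialSubsequences nums → Spec_countSpecialSubsequences nums (countSpecialSubsequences nums)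

-- ===== LEMMAS AND PROOFS =====

theorem pvmod_eq (a : Int) : PySem.Int.mod a pvM = a % pvM :=
  PySem.Int.mod_eq_emod_of_pos (by norm_num [pvM])

-- Exact (un-reduced) suffix counts: Tr l = (t2, t1, t0) = numbers of subsequences of l
-- matching 2+, 1+2+, 0+1+2+ respectively (any element other than 0,1 plays the role of 2).
def Tr : List Int → Int × Int × Int
  | [] => (0, 0, 0)
  | n :: l =>
    let (t2, t1, t0) := Tr l
    if n = 0 then (t2, t1, 2 * t0 + t1)
    else if n = 1 then (t2, 2 * t1 + t2, t0)
    else (2 * t2 + 1, t1, t0)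

-- B's running state is the exact count reduced mod pvM, componentwise.
theorem foldrB_eq (l : List Int) :
    l.foldr stepB (0, 0, 0) = ((Tr l).1 % pvM, (Tr l).2.1 % pvM, (Tr l).2.2 % pvM) := by
  induction l with
  | nil => simp [Tr]
  | cons n l ih =>
    rcases hTr : Tr l with ⟨t2, t1, t0⟩
    by_cases h0 : n = 0
    · simp [stepB, Tr, h0, hTr, ih, pvmod_eq, Prod.ext_iff]
      simp only [pvM]; omega
    · by_cases h1 : n = 1
      · simp [stepB, Tr, h1, hTr, ih, pvmod_eq, Prod.ext_iff]
        simp only [pvM]; omega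
      · simp [stepB, Tr, h0, h1, hTr, ih, pvmod_eq, Prod.ext_iff]
        simp only [pvM]; omega

-- Mixed "bridge" expression: Ebr l f1 f2 c0 ≡ (mod pvM) A's final f2 when A's loop is
-- started in state (f1, f2, c0) and run over the remaining list l.
def Ebr (l : List Int) (f1 f2 : Int) (c0 : Nat) : Int :=
  f2 * ((Tr l).1 + 1) + f1 * ((Tr l).2.1 + (Tr l).1)
    + ((2 : Int) ^ c0 - 1) * ((Tr l).2.2 + (Tr l).2.1) + (Tr l).2.2

theorem mod_mul_add (x k c : Int) : (x % pvM * k + c) % pvM = (x * k + c) % pvM := by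
  rw [Int.add_emod, Int.mul_emod, Int.emod_emod_of_dvd x dvd_rfl, ← Int.mul_emod, ← Int.add_emod]

-- Ebr is linear in f1 (resp. f2), so reducing that argument mod pvM is harmless mod pvM.
theorem Ebr_mod_f1 (l : List Int) (f1 f2 : Int) (c0 : Nat) :
    Ebr l (f1 % pvM) f2 c0 % pvM = Ebr l f1 f2 c0 % pvM := by
  have h1 : Ebr l (f1 % pvM) f2 c0 = (f1 % pvM) * ((Tr l).2.1 + (Tr l).1)
      + (f2 * ((Tr l).1 + 1) + ((2 : Int) ^ c0 - 1) * ((Tr l).2.2 + (Tr l).2.1) + (Tr l).2.2) := by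
    unfold Ebr; ring
  have h2 : Ebr l f1 f2 c0 = f1 * ((Tr l).2.1 + (Tr l).1)
      + (f2 * ((Tr l).1 + 1) + ((2 : Int) ^ c0 - 1) * ((Tr l).2.2 + (Tr l).2.1) + (Tr l).2.2) := by
    unfold Ebr; ring
  rw [h1, h2, mod_mul_add]

theorem Ebr_mod_f2 (l : List Int) (f1 f2 : Int) (c0 : Nat) :
    Ebr l f1 (f2 % pvM) c0 % pvM = Ebr l f1 f2 c0 % pvM := by
  have h1 : Ebr l f1 (f2 % pvM) c0 = (f2 % pvM) * ((Tr l).1 + 1)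
      + (f1 * ((Tr l).2.1 + (Tr l).1) + ((2 : Int) ^ c0 - 1) * ((Tr l).2.2 + (Tr l).2.1) + (Tr l).2.2) := by
    unfold Ebr; ring
  have h2 : Ebr l f1 f2 c0 = f2 * ((Tr l).1 + 1)
      + (f1 * ((Tr l).2.1 + (Tr l).1) + ((2 : Int) ^ c0 - 1) * ((Tr l).2.2 + (Tr l).2.1) + (Tr l).2.2) := by
    unfold Ebr; ring
  rw [h1, h2, mod_mul_add]

theorem foldlA_bridge (l : List Int) :
    ∀ (f1 f2 : Int) (c0 : Nat), (c0 = 0 → f1 = 0 ∧ f2 = 0) →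
      (l.foldl stepA (f1, f2, c0)).2.1 % pvM = Ebr l f1 f2 c0 % pvM := by
  induction l with
  | nil => intro f1 f2 c0 _; simp [Ebr, Tr]
  | cons n l ih =>
    intro f1 f2 c0 hz
    rcases hTr : Tr l with ⟨t2, t1, t0⟩
    rw [List.foldl_cons]
    by_cases h0 : n = 0
    · subst h0
      have hs : stepA (f1, f2, c0) 0 = (f1, f2, c0 + 1) := by simp [stepA]
      rw [hs, ih f1 f2 (c0 + 1) (by omega)]
      congr 1
      simp [Ebr, Tr, hTr, pow_succ]; ring
    · by_cases hc : c0 = 0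
      · obtain ⟨e1, e2⟩ := hz hc
        have hs : stepA (f1, f2, c0) n = (f1, f2, c0) := by simp [stepA, h0, hc]
        rw [hs, ih f1 f2 c0 hz]
        congr 1
        by_cases h1 : n = 1 <;> simp [Ebr, Tr, hTr, h0, h1, e1, e2, hc]
      · by_cases h1 : n = 1
        · subst h1
          have hs : stepA (f1, f2, c0) 1
              = ((((2 : Int) ^ c0 - 1) + 2 * f1) % pvM, f2, c0) := by
            simp [stepA, hc, pvmod_eq]
          rw [hs, ih _ f2 c0 (fun h => absurd h hc), Ebr_mod_f1]
          congr 1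
          simp [Ebr, Tr, hTr]; ring
        · have hs : stepA (f1, f2, c0) n = (f1, (f1 + 2 * f2) % pvM, c0) := by
            simp [stepA, h0, h1, hc, pvmod_eq]
          rw [hs, ih f1 _ c0 (fun h => absurd h hc), Ebr_mod_f2]
          congr 1
          simp [Ebr, Tr, hTr, h0, h1]; ring

-- A's running f1 and f2 stay reduced (fixed points of % pvM).
theorem foldlA_reduced (l : List Int) :
    ∀ (f1 f2 : Int) (c0 : Nat), f1 % pvM = f1 → f2 % pvM = f2 →
      (l.foldl stepA (f1, f2, c0)).2.1 % pvM = (l.foldl stepA (f1, f2, c0)).2.1 := by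
  induction l with
  | nil => intro f1 f2 c0 _ h2; simpa using h2
  | cons n l ih =>
    intro f1 f2 c0 h1 h2
    by_cases h0 : n = 0
    · simpa [List.foldl_cons, stepA, h0] using ih f1 f2 (c0 + 1) h1 h2
    · by_cases hc : c0 = 0
      · simpa [List.foldl_cons, stepA, h0, hc] using ih f1 f2 c0 h1 h2
      · by_cases hn : n = 1
        · simpa [List.foldl_cons, stepA, h0, hc, hn] using
            ih (PySem.Int.mod ((2 ^ c0 - 1) + 2 * f1) pvM) f2 c0
              (by simp [pvmod_eq, Int.emod_emod_of_dvd _ dvd_rfl]) h2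
        · simpa [List.foldl_cons, stepA, h0, hc, hn] using
            ih f1 (PySem.Int.mod (f1 + 2 * f2) pvM) c0 h1
              (by simp [pvmod_eq, Int.emod_emod_of_dvd _ dvd_rfl])

-- ===== VERDICT (by name: the statement is the Claim_ definition above) =====
theorem countSpecialSubsequences_spec : Claim_equal_countSpecialSubsequences := by
  intro nums _
  unfold Spec_countSpecialSubsequences countSpecialSubsequences countSpecialSubsequences_alt
  rw [foldrB_eq]
  have hred := foldlA_reduced nums 0 0 0 (by decide) (by decide)
  have hbr := foldlA_bridge nums 0 0 0 (by intro _; exact ⟨rfl, rfl⟩)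
  rw [← hred, hbr]
  simp [Ebr]
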